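-- pv_equiv track=rewrite | github.com/fabricioguidine/api-param-coverage | src/modules/workflow/scenario_generator.py | _parse_gherkin_to_scenarios
-- ===== SOURCE A (Python) =====
-- from typing import List, Dict, Any, Optional
--
-- def _parse_gherkin_to_scenarios(gherkin_content: str) -> List[Dict[str, Any]]:
--     """
--     Parse Gherkin content to extract scenario data.
--
--     Args:
--         gherkin_content: Gherkin scenarios string
--
--     Returns:
--         List of scenario dictionaries
--     """
--     scenarios = []
--     current_feature = None
--     current_scenario = None
--     current_steps = []
--     tags = []
--
--     lines = gherkin_content.split('\n')
--
--     for line in lines: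
--         line = line.strip()
--
--         if line.startswith('Feature:'):
--             current_feature = line.replace('Feature:', '').strip()
--         elif line.startswith('@'):
--             tags = [tag.strip('@') for tag in line.split() if tag.startswith('@')]
--         elif line.startswith('Scenario:') or line.startswith('Scenario Outline:'):
--             if current_scenario:
--                 scenarios.append({
--                     'Feature': current_feature or 'Unknown',
--                     'Scenario': current_scenario,
--                     'Tags': ', '.join(tags) if tags else '',
--                     'All Steps': '\n'.join(current_steps)
--                 })
--             current_scenario = line.replace('Scenario:', '').replace('Scenario Outline:', '').strip()
--             current_steps = []
--             tags = []
--         elif line and (line.startswith('Given') or line.startswith('When') or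
--                       line.startswith('Then') or line.startswith('And') or
--                       line.startswith('But')):
--             current_steps.append(line)
--
--     # Add last scenario
--     if current_scenario:
--         scenarios.append({
--             'Feature': current_feature or 'Unknown',
--             'Scenario': current_scenario,
--             'Tags': ', '.join(tags) if tags else '',
--             'All Steps': '\n'.join(current_steps)
--         })
--
--     return scenarios
-- ===== SOURCE B (Python) =====
-- def _parse_gherkin_to_scenarios(gherkin_content: str):
--     """Block-structured parse: skip the preamble (tracking the feature), then
--     consume one scenario block at a time instead of a flush-on-header state machine."""
--     lines = [l.strip() for l in gherkin_content.split('\n')]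
--     n = len(lines)
--
--     def is_header(l):
--         return l.startswith('Scenario:') or l.startswith('Scenario Outline:')
--
--     scenarios = []
--     feature = None
--     i = 0
--     # preamble: everything before the first scenario header; only Feature: matters
--     while i < n and not is_header(lines[i]):
--         if lines[i].startswith('Feature:'):
--             feature = lines[i].replace('Feature:', '').strip()
--         i += 1
--     # one iteration per scenario block
--     while i < n:
--         name = lines[i].replace('Scenario:', '').replace('Scenario Outline:', '').strip()
--         i += 1
--         tags = ''
--         steps = []
--         while i < n and not is_header(lines[i]):
--             l = lines[i]
--             if l.startswith('Feature:'):
--                 feature = l.replace('Feature:', '').strip()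
--             elif l.startswith('@'):
--                 tags = ', '.join(t.strip('@') for t in l.split() if t.startswith('@'))
--             elif l.startswith(('Given', 'When', 'Then', 'And', 'But')):
--                 steps.append(l)
--             i += 1
--         if name:
--             scenarios.append({
--                 'Feature': feature or 'Unknown',
--                 'Scenario': name,
--                 'Tags': tags,
--                 'All Steps': '\n'.join(steps),
--             })
--     return scenarios
-- ===== Notes on version B (the rewrite author's own statement) =====
-- stated objective: alternative
-- what changed: B replaces A's single-pass flush-on-next-header state machine (carrying scenarios/feature/scenario/steps/tags and emitting the previous scenario when a new header or EOF is reached) by a block-structured parse: a preamble scan that only tracks the Feature line, then one loop per scenario block that scans forward to the next header and builds that block's dict at its end.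
import Mathlib
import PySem

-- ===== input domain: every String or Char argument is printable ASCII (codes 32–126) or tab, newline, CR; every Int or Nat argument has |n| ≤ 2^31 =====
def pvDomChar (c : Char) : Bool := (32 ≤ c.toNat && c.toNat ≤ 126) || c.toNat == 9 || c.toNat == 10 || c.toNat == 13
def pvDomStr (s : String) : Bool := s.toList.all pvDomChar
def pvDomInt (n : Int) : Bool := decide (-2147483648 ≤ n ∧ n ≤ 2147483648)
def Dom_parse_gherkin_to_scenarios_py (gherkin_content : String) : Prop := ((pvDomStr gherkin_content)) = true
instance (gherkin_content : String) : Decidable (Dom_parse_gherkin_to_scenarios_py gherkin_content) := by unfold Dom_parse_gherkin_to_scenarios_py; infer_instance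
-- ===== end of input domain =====

-- B replaces A's flush-on-next-header state machine by a block-structured parse
-- (preamble scan, then one loop per scenario block); objective: alternative decomposition, same O(n) cost.

-- ===== PORT A =====
-- A's truthiness test for current_scenario (None and '' are falsy)
def pvTruthyA (o : Option String) : Bool :=
  match o with
  | none => false
  | some s => !(s == "")

-- 'current_feature or "Unknown"' (None and '' both give 'Unknown'; shared by both ports)
def pvFeatOrUnknown (o : Option String) : String :=
  match o with
  | none => "Unknown"
  | some f => if f == "" then "Unknown" else f

-- the dict literal A appends
def pvMkDictA (feature : Option String) (scen : String) (steps tags : List String) :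
    List (String × String) :=
  [("Feature", pvFeatOrUnknown feature),
   ("Scenario", scen),
   ("Tags", if tags == [] then "" else PySem.Str.join ", " tags),
   ("All Steps", PySem.Str.join "\n" steps)]

-- one iteration of A's for-loop; state = (scenarios, current_feature, current_scenario, current_steps, tags)
def pvStepA :
    (List (List (String × String)) × Option String × Option String × List String × List String) →
    String →
    (List (List (String × String)) × Option String × Option String × List String × List String)
  | (scenarios, feature, scen, steps, tags), raw =>
    let line := PySem.Str.strip raw
    if PySem.Str.startswith line "Feature:" then
      (scenarios, some (PySem.Str.strip (PySem.Str.replace line "Feature:" "")), scen, steps, tags)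
    else if PySem.Str.startswith line "@" then
      (scenarios, feature, scen, steps,
        ((PySem.Str.split₀ line).filter (fun t => PySem.Str.startswith t "@")).map
          (fun t => PySem.Str.stripChars t "@"))
    else if PySem.Str.startswith line "Scenario:" || PySem.Str.startswith line "Scenario Outline:" then
      ((if pvTruthyA scen then scenarios ++ [pvMkDictA feature (scen.getD "") steps tags] else scenarios),
       feature,
       some (PySem.Str.strip (PySem.Str.replace (PySem.Str.replace line "Scenario:" "") "Scenario Outline:" "")),
       [], [])
    else if !(line == "") &&
        (PySem.Str.startswith line "Given" || PySem.Str.startswith line "When" ||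
         PySem.Str.startswith line "Then" || PySem.Str.startswith line "And" ||
         PySem.Str.startswith line "But") then
      (scenarios, feature, scen, steps ++ [line], tags)
    else
      (scenarios, feature, scen, steps, tags)

def parse_gherkin_to_scenarios_py (gherkin_content : String) : List (List (String × String)) :=
  let lines := (PySem.Str.split? gherkin_content "\n").getD []
  match lines.foldl pvStepA ([], none, none, [], []) with
  | (scenarios, feature, scen, steps, tags) =>
    if pvTruthyA scen then scenarios ++ [pvMkDictA feature (scen.getD "") steps tags] else scenarios

-- ===== PORT B =====
def pvIsHeaderB (l : String) : Bool :=
  PySem.Str.startswith l "Scenario:" || PySem.Str.startswith l "Scenario Outline:"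

def pvFeatValB (l : String) : String :=
  PySem.Str.strip (PySem.Str.replace l "Feature:" "")

def pvNameB (l : String) : String :=
  PySem.Str.strip (PySem.Str.replace (PySem.Str.replace l "Scenario:" "") "Scenario Outline:" "")

def pvTagListB (l : String) : List String :=
  ((PySem.Str.split₀ l).filter (fun t => PySem.Str.startswith t "@")).map
    (fun t => PySem.Str.stripChars t "@")

def pvTagsStrB (l : String) : String := PySem.Str.join ", " (pvTagListB l)

def pvIsStepB (l : String) : Bool :=
  PySem.Str.startswith l "Given" || PySem.Str.startswith l "When" ||
  PySem.Str.startswith l "Then" || PySem.Str.startswith l "And" ||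
  PySem.Str.startswith l "But"

-- one body line of a block; state = (feature, tags, steps)
def pvStepB : (Option String × String × List String) → String → (Option String × String × List String)
  | (feature, tags, steps), l =>
    if PySem.Str.startswith l "Feature:" then (some (pvFeatValB l), tags, steps)
    else if PySem.Str.startswith l "@" then (feature, pvTagsStrB l, steps)
    else if pvIsStepB l then (feature, tags, steps ++ [l])
    else (feature, tags, steps)

def pvMkDictB (feature : Option String) (name tags : String) (steps : List String) :
    List (String × String) :=
  [("Feature", pvFeatOrUnknown feature),
   ("Scenario", name),
   ("Tags", tags),
   ("All Steps", PySem.Str.join "\n" steps)]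

-- the inner while loop = scan to the next header (takeWhile/dropWhile); one recursive call per block
def pvBlocksB (feature : Option String) (ls : List String) : List (List (String × String)) :=
  match ls with
  | [] => []
  | h :: rest =>
    let name := pvNameB h
    let body := rest.takeWhile (fun l => !pvIsHeaderB l)
    let rest' := rest.dropWhile (fun l => !pvIsHeaderB l)
    let st := body.foldl pvStepB (feature, "", [])
    let out := pvBlocksB st.1 rest'
    if name == "" then out else pvMkDictB st.1 name st.2.1 st.2.2 :: out
termination_by ls.length
decreasing_by
  exact Nat.lt_succ_of_le (List.dropWhile_sublist (l := rest) (p := fun l => !pvIsHeaderB l)).length_le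

def parse_gherkin_to_scenarios_py_alt (gherkin_content : String) : List (List (String × String)) :=
  let lines := ((PySem.Str.split? gherkin_content "\n").getD []).map PySem.Str.strip
  let pre := lines.takeWhile (fun l => !pvIsHeaderB l)
  let rest := lines.dropWhile (fun l => !pvIsHeaderB l)
  let feat0 := pre.foldl
    (fun f l => if PySem.Str.startswith l "Feature:" then some (pvFeatValB l) else f) none
  pvBlocksB feat0 rest

-- ===== PRECONDITION & SPEC =====
def Spec_parse_gherkin_to_scenarios_py (gherkin_content : String) (out : List (List (String × String))) : Prop := out = parse_gherkin_to_scenarios_py_alt gherkin_content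
instance (gherkin_content : String) (out : List (List (String × String))) : Decidable (Spec_parse_gherkin_to_scenarios_py gherkin_content out) := by unfold Spec_parse_gherkin_to_scenarios_py; infer_instance

-- ===== CLAIM (what is proved, stated in full; the proofs are below) =====
def Claim_equal_parse_gherkin_to_scenarios_py : Prop := ∀ (gherkin_content : String), Dom_parse_gherkin_to_scenarios_py gherkin_content → Spec_parse_gherkin_to_scenarios_py gherkin_content (parse_gherkin_to_scenarios_py gherkin_content)

-- ===== LEMMAS AND PROOFS =====

-- proof-side mirror of A's loop, written as structural recursion over the (already stripped) lines
def pvEmit (feature scen : Option String) (steps tags : List String) : List String → List (List (String × String))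
  | [] => if pvTruthyA scen then [pvMkDictA feature (scen.getD "") steps tags] else []
  | l :: ls =>
    if PySem.Str.startswith l "Feature:" then pvEmit (some (pvFeatValB l)) scen steps tags ls
    else if PySem.Str.startswith l "@" then pvEmit feature scen steps (pvTagListB l) ls
    else if pvIsHeaderB l then
      (if pvTruthyA scen then [pvMkDictA feature (scen.getD "") steps tags] else []) ++
        pvEmit feature (some (pvNameB l)) [] [] ls
    else if !(l == "") && pvIsStepB l then pvEmit feature scen (steps ++ [l]) tags ls
    else pvEmit feature scen steps tags ls

theorem pv_join_nil : PySem.Str.join ", " ([] : List String) = "" := by rfl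

theorem pv_mkDict_eq (f : Option String) (n : String) (st tg : List String) :
    pvMkDictA f n st tg = pvMkDictB f n (PySem.Str.join ", " tg) st := by
  unfold pvMkDictA pvMkDictB pvFeatOrUnknown
  cases tg <;> simp [pv_join_nil]

theorem pv_head {l p : String} (h : PySem.Str.startswith l p = true) (c : Char)
    (hp : p.toList.head? = some c) : l.toList.head? = some c := by
  rw [PySem.Str.startswith_eq] at h
  rcases (PySem.Chars.startswith_iff _ _).mp h with ⟨t, ht⟩
  rw [← ht]
  cases hpl : p.toList with
  | nil => rw [hpl] at hp; simp at hp
  | cons a as => rw [hpl] at hp; simpa using hp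

theorem pv_feature_not_header {l : String} (h : PySem.Str.startswith l "Feature:" = true) :
    pvIsHeaderB l = false := by
  have hF := pv_head h 'F' (by decide)
  unfold pvIsHeaderB
  by_contra hc
  simp only [Bool.not_eq_false, Bool.or_eq_true] at hc
  rcases hc with hc | hc <;> {
    have hS := pv_head hc 'S' (by decide)
    have := hF.symm.trans hS
    simp at this }

theorem pv_at_not_header {l : String} (h : PySem.Str.startswith l "@" = true) :
    pvIsHeaderB l = false := by
  have hF := pv_head h '@' (by decide)
  unfold pvIsHeaderB
  by_contra hc
  simp only [Bool.not_eq_false, Bool.or_eq_true] at hc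
  rcases hc with hc | hc <;> {
    have hS := pv_head hc 'S' (by decide)
    have := hF.symm.trans hS
    simp at this }

theorem pv_step_head {l : String} (h : pvIsStepB l = true) :
    ∃ c, l.toList.head? = some c := by
  unfold pvIsStepB at h
  simp only [Bool.or_eq_true] at h
  rcases h with ((((h | h) | h) | h) | h)
  · exact ⟨'G', pv_head h 'G' (by decide)⟩
  · exact ⟨'W', pv_head h 'W' (by decide)⟩
  · exact ⟨'T', pv_head h 'T' (by decide)⟩
  · exact ⟨'A', pv_head h 'A' (by decide)⟩
  · exact ⟨'B', pv_head h 'B' (by decide)⟩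

theorem pv_step_ne_empty {l : String} (h : pvIsStepB l = true) : (l == "") = false := by
  rcases pv_step_head h with ⟨c, hc⟩
  simp only [beq_eq_false_iff_ne, ne_eq]
  intro he
  rw [he] at hc
  simp at hc

-- A's trailing flush, as a function of the final fold state
def pvFinalA (st : List (List (String × String)) × Option String × Option String × List String × List String) :
    List (List (String × String)) :=
  if pvTruthyA st.2.2.1 then
    st.1 ++ [pvMkDictA st.2.1 (st.2.2.1.getD "") st.2.2.2.1 st.2.2.2.2]
  else st.1

-- L: A's fold + final flush equals pvEmit on the stripped lines
theorem pv_foldA_eq_emit (raws : List String) (sc : List (List (String × String)))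
    (feature scen : Option String) (steps tags : List String) :
    pvFinalA (raws.foldl pvStepA (sc, feature, scen, steps, tags)) =
      sc ++ pvEmit feature scen steps tags (raws.map PySem.Str.strip) := by
  induction raws generalizing sc feature scen steps tags with
  | nil =>
    simp only [List.foldl_nil, List.map_nil, pvEmit, pvFinalA]
    cases h : pvTruthyA scen <;> simp
  | cons raw rest ih =>
    simp only [List.foldl_cons, List.map_cons, pvEmit]
    by_cases h1 : PySem.Str.startswith (PySem.Str.strip raw) "Feature:" = true
    · have hs : pvStepA (sc, feature, scen, steps, tags) raw =
          (sc, some (pvFeatValB (PySem.Str.strip raw)), scen, steps, tags) := by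
        simp only [pvStepA, pvFeatValB]; rw [if_pos h1]
      rw [hs, ih]
      simp only [h1, if_true]
    · by_cases h2 : PySem.Str.startswith (PySem.Str.strip raw) "@" = true
      · have hs : pvStepA (sc, feature, scen, steps, tags) raw =
            (sc, feature, scen, steps, pvTagListB (PySem.Str.strip raw)) := by
          simp only [pvStepA, pvTagListB]; rw [if_neg h1, if_pos h2]
        rw [hs, ih]
        simp only [h1, h2, if_true, Bool.false_eq_true, if_false]
      · by_cases h3 : (PySem.Str.startswith (PySem.Str.strip raw) "Scenario:" ||
            PySem.Str.startswith (PySem.Str.strip raw) "Scenario Outline:") = true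
        · have hH : pvIsHeaderB (PySem.Str.strip raw) = true := h3
          have hs : pvStepA (sc, feature, scen, steps, tags) raw =
              ((if pvTruthyA scen then sc ++ [pvMkDictA feature (scen.getD "") steps tags] else sc),
               feature, some (pvNameB (PySem.Str.strip raw)), [], []) := by
            simp only [pvStepA, pvNameB]; rw [if_neg h1, if_neg h2, if_pos h3]
          rw [hs, ih]
          simp only [h1, h2, hH, if_true, Bool.false_eq_true, if_false]
          cases h : pvTruthyA scen <;> simp [List.append_assoc]
        · have hH : pvIsHeaderB (PySem.Str.strip raw) = false := by
            unfold pvIsHeaderB; simpa using h3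
          by_cases h4 : (!(PySem.Str.strip raw == "") && pvIsStepB (PySem.Str.strip raw)) = true
          · have hs : pvStepA (sc, feature, scen, steps, tags) raw =
                (sc, feature, scen, steps ++ [PySem.Str.strip raw], tags) := by
              simp only [pvStepA]
              rw [if_neg h1, if_neg h2, if_neg (by simpa using h3),
                if_pos (by simpa [pvIsStepB] using h4)]
            rw [hs, ih]
            simp only [h1, h2, hH, h4, if_true, Bool.false_eq_true, if_false]
          · have hs : pvStepA (sc, feature, scen, steps, tags) raw =
                (sc, feature, scen, steps, tags) := by
              simp only [pvStepA]
              rw [if_neg h1, if_neg h2, if_neg (by simpa using h3),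
                if_neg (by simpa [pvIsStepB] using h4)]
            rw [hs, ih]
            simp only [h1, h2, hH, h4, Bool.false_eq_true, if_false]

-- unfolding lemma for pvBlocksB on a cons
theorem pvBlocksB_cons (feature : Option String) (h : String) (rest : List String) :
    pvBlocksB feature (h :: rest) =
      (if pvNameB h == ""
       then pvBlocksB ((rest.takeWhile (fun l => !pvIsHeaderB l)).foldl pvStepB (feature, "", [])).1
              (rest.dropWhile (fun l => !pvIsHeaderB l))
       else pvMkDictB ((rest.takeWhile (fun l => !pvIsHeaderB l)).foldl pvStepB (feature, "", [])).1
              (pvNameB h)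
              ((rest.takeWhile (fun l => !pvIsHeaderB l)).foldl pvStepB (feature, "", [])).2.1
              ((rest.takeWhile (fun l => !pvIsHeaderB l)).foldl pvStepB (feature, "", [])).2.2 ::
            pvBlocksB ((rest.takeWhile (fun l => !pvIsHeaderB l)).foldl pvStepB (feature, "", [])).1
              (rest.dropWhile (fun l => !pvIsHeaderB l))) := by
  rw [pvBlocksB.eq_def]

-- M: pvEmit inside a block equals flush-at-block-end plus pvBlocksB on the remainder
theorem pv_emit_block (ls : List String) (feature : Option String) (name : String)
    (steps tags : List String) :
    pvEmit feature (some name) steps tags ls =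
      (match (ls.takeWhile (fun l => !pvIsHeaderB l)).foldl pvStepB
          (feature, PySem.Str.join ", " tags, steps) with
       | (f, tg, st) =>
         (if name == "" then [] else [pvMkDictB f name tg st]) ++
           pvBlocksB f (ls.dropWhile (fun l => !pvIsHeaderB l))) := by
  induction ls generalizing feature name steps tags with
  | nil =>
    simp only [List.takeWhile_nil, List.dropWhile_nil, List.foldl_nil, pvEmit, pvBlocksB]
    have ht : pvTruthyA (some name) = !(name == "") := rfl
    rw [ht, pv_mkDict_eq]
    cases h : (name == "") <;> simp
  | cons l ls ih =>
    by_cases h1 : PySem.Str.startswith l "Feature:" = true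
    · have hH := pv_feature_not_header h1
      simp only [pvEmit, h1, if_true, List.takeWhile_cons, List.dropWhile_cons, hH,
        Bool.not_false, if_true, List.foldl_cons]
      have hs : pvStepB (feature, PySem.Str.join ", " tags, steps) l =
          (some (pvFeatValB l), PySem.Str.join ", " tags, steps) := by
        simp only [pvStepB]; rw [if_pos h1]
      rw [hs]; exact ih ..
    · by_cases h2 : PySem.Str.startswith l "@" = true
      · have hH := pv_at_not_header h2
        simp only [pvEmit, h1, h2, if_true, Bool.false_eq_true, if_false,
          List.takeWhile_cons, List.dropWhile_cons, hH, Bool.not_false, List.foldl_cons]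
        have hs : pvStepB (feature, PySem.Str.join ", " tags, steps) l =
            (feature, PySem.Str.join ", " (pvTagListB l), steps) := by
          simp only [pvStepB]; rw [if_neg h1, if_pos h2]; rfl
        rw [hs]; exact ih ..
      · by_cases h3 : pvIsHeaderB l = true
        · simp only [pvEmit, h1, h2, h3, if_true, Bool.false_eq_true, if_false,
            List.takeWhile_cons, List.dropWhile_cons, Bool.not_true, List.foldl_nil,
            Option.getD_some]
          rw [ih feature (pvNameB l) [] [], pvBlocksB_cons]
          have hj : PySem.Str.join ", " ([] : List String) = "" := rfl
          rw [hj]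
          rcases hfd : (ls.takeWhile (fun l => !pvIsHeaderB l)).foldl pvStepB (feature, "", [])
            with ⟨f, tg, st⟩
          have ht : pvTruthyA (some name) = !(name == "") := rfl
          rw [ht, pv_mkDict_eq]
          cases hn : (name == "") <;> cases hn' : (pvNameB l == "") <;> simp [hn, hn']
        · have h3' : pvIsHeaderB l = false := by simpa using h3
          simp only [pvEmit, h1, h2, h3', Bool.false_eq_true, if_false,
            List.takeWhile_cons, List.dropWhile_cons, Bool.not_false, if_true,
            List.foldl_cons]
          by_cases h4 : pvIsStepB l = true
          · have hne := pv_step_ne_empty h4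
            simp only [h4, hne, Bool.not_false, Bool.and_self, if_true]
            have hs : pvStepB (feature, PySem.Str.join ", " tags, steps) l =
                (feature, PySem.Str.join ", " tags, steps ++ [l]) := by
              simp only [pvStepB]; rw [if_neg h1, if_neg h2, if_pos h4]
            rw [hs]; exact ih ..
          · have h4' : pvIsStepB l = false := by simpa using h4
            simp only [h4', Bool.and_false, Bool.false_eq_true, if_false]
            have hs : pvStepB (feature, PySem.Str.join ", " tags, steps) l =
                (feature, PySem.Str.join ", " tags, steps) := by
              simp only [pvStepB]; rw [if_neg h1, if_neg h2, if_neg (by simp [h4'])]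
            rw [hs]; exact ih ..

-- M0: pvEmit in the preamble (no current scenario) equals B's preamble fold + pvBlocksB
theorem pv_emit_preamble (ls : List String) (feature : Option String) (steps tags : List String) :
    pvEmit feature none steps tags ls =
      pvBlocksB
        ((ls.takeWhile (fun l => !pvIsHeaderB l)).foldl
          (fun f l => if PySem.Str.startswith l "Feature:" then some (pvFeatValB l) else f) feature)
        (ls.dropWhile (fun l => !pvIsHeaderB l)) := by
  induction ls generalizing feature steps tags with
  | nil => simp [pvEmit, pvTruthyA, pvBlocksB]
  | cons l ls ih =>
    by_cases h1 : PySem.Str.startswith l "Feature:" = true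
    · have hH := pv_feature_not_header h1
      simp only [pvEmit, h1, if_true, List.takeWhile_cons, List.dropWhile_cons, hH,
        Bool.not_false, if_true, List.foldl_cons]
      exact ih ..
    · by_cases h2 : PySem.Str.startswith l "@" = true
      · have hH := pv_at_not_header h2
        simp only [pvEmit, h1, h2, if_true, Bool.false_eq_true, if_false,
          List.takeWhile_cons, List.dropWhile_cons, hH, Bool.not_false, List.foldl_cons]
        exact ih ..
      · by_cases h3 : pvIsHeaderB l = true
        · simp only [pvEmit, h1, h2, h3, if_true, Bool.false_eq_true, if_false, pvTruthyA,
            List.takeWhile_cons, List.dropWhile_cons, Bool.not_true, List.foldl_nil,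
            List.nil_append]
          rw [pv_emit_block ls feature (pvNameB l) [] [], pvBlocksB_cons]
          have hj : PySem.Str.join ", " ([] : List String) = "" := rfl
          rw [hj]
          rcases hfd : (ls.takeWhile (fun l => !pvIsHeaderB l)).foldl pvStepB (feature, "", [])
            with ⟨f, tg, st⟩
          cases hn : (pvNameB l == "") <;> simp [hn]
        · have h3' : pvIsHeaderB l = false := by simpa using h3
          simp only [pvEmit, h1, h2, h3', Bool.false_eq_true, if_false,
            List.takeWhile_cons, List.dropWhile_cons, Bool.not_false, if_true,
            List.foldl_cons]
          by_cases h4 : (!(l == "") && pvIsStepB l) = true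
          · simp only [h4, if_true]; exact ih ..
          · simp only [h4, Bool.false_eq_true, if_false]; exact ih ..

-- ===== VERDICT (by name: the statement is the Claim_ definition above) =====
theorem parse_gherkin_to_scenarios_py_spec : Claim_equal_parse_gherkin_to_scenarios_py := by
  intro g _
  unfold Spec_parse_gherkin_to_scenarios_py
  show pvFinalA (((PySem.Str.split? g "\n").getD []).foldl pvStepA ([], none, none, [], [])) =
    parse_gherkin_to_scenarios_py_alt g
  rw [pv_foldA_eq_emit, List.nil_append, pv_emit_preamble]
  rfl
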